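-- pv_equiv track=rewrite | github.com/EvgenyGorelov/Merchants_Guide_TDD | main.py | create_intergal_roman_dict
-- ===== SOURCE A (Python) =====
-- def create_intergal_roman_dict(dict_list):
--     """Returns dictionary {Intergalactic numerals: Roman symbols}.
--     If contradictory dictionary entries exist, execution stops."""
--
--     intergal_roman_dict = {}
--     for dict_entry in dict_list:
--         if dict_entry[0] not in intergal_roman_dict:
--             intergal_roman_dict[dict_entry[0]] = dict_entry[2]
--         elif intergal_roman_dict[dict_entry[0]] == dict_entry[2]:
--             continue  # diplicating entry in dictionary; do nothing
--         else:  # contradicting entries in input dictionary, stop execution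
--             raise SystemExit("Contradicting entries in input dictionary!")
--     return(intergal_roman_dict)
-- ===== SOURCE B (Python) =====
-- def create_intergal_roman_dict(dict_list):
--     """Two-phase: first group all values per key, then check each group."""
--     groups = {}
--     for entry in dict_list:
--         vals = groups.setdefault(entry[0], [])
--         if entry[2] not in vals:
--             vals.append(entry[2])
--     result = {}
--     for key, vals in groups.items():
--         if len(vals) > 1:
--             raise SystemExit("Contradicting entries in input dictionary!")
--         result[key] = vals[0]
--     return result
-- ===== Notes on version B (the rewrite author's own statement) =====
-- stated objective: alternative
-- what changed: B replaces A's single interleaved insert-or-compare loop by two distinct phases: a grouping pass building a multimap key -> distinct values, then a validation pass that raises on any multi-valued key and emits the singleton value per key.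
import Mathlib
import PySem

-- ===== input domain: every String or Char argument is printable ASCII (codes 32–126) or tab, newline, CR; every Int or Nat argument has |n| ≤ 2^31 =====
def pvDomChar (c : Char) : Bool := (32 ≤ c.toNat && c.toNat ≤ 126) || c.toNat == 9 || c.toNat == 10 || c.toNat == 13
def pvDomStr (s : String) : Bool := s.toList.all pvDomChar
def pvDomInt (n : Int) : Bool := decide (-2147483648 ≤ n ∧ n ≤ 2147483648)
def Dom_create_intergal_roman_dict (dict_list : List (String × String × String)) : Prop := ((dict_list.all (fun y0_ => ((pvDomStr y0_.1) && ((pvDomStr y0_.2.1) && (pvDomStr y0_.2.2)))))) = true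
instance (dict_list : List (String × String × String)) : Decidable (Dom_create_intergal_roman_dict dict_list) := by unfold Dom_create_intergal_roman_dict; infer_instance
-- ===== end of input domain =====

-- B re-implements A's interleaved insert-or-check loop as two distinct phases (group values per key, then validate); objective: alternative (same cost).


-- ===== PORT A =====
-- A's loop: if key absent insert, elif same value skip, else raise SystemExit.
-- The raise branch is outside Pre_; the port returns the dict built so far there.
def goA (acc : List (String × String)) : List (String × String × String) → List (String × String)
  | [] => acc
  | e :: t =>
    if ¬ (acc.any (fun p => p.1 == e.1)) then goA (acc ++ [(e.1, e.2.2)]) t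
    else if (((acc.find? (fun p => p.1 == e.1)).map Prod.snd).getD "") == e.2.2 then goA acc t
    else acc  -- raise SystemExit (excluded by Pre_)

def create_intergal_roman_dict (dict_list : List (String × String × String)) : List (String × String) :=
  goA [] dict_list

-- ===== PORT B =====
-- phase 1: multimap key -> distinct values seen (groups.setdefault(k,[]) ; append if absent)
def bAdd (g : List (String × List String)) (k v : String) : List (String × List String) :=
  if g.any (fun p => p.1 == k) then
    g.map (fun p => if p.1 == k then (p.1, if v ∈ p.2 then p.2 else p.2 ++ [v]) else p)
  else g ++ [(k, [v])]

-- phase 2: raise if a group has more than one value, else emit its single value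
def goB2 (res : List (String × String)) : List (String × List String) → List (String × String)
  | [] => res
  | (k, vs) :: t =>
    if vs.length > 1 then res  -- raise SystemExit (excluded by Pre_)
    else goB2 (res ++ [(k, vs.headD "")]) t

def create_intergal_roman_dict_alt (dict_list : List (String × String × String)) : List (String × String) :=
  goB2 [] (dict_list.foldl (fun g e => bAdd g e.1 e.2.2) [])

-- ===== PRECONDITION & SPEC =====
-- Pre_ excludes exactly the contradictory inputs (two entries with the same key but different
-- third components), on which the Python A raises SystemExit (and B raises the same).
def Pre_create_intergal_roman_dict (dict_list : List (String × String × String)) : Prop :=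
  ∀ e1 ∈ dict_list, ∀ e2 ∈ dict_list, e1.1 = e2.1 → e1.2.2 = e2.2.2
instance (dict_list : List (String × String × String)) : Decidable (Pre_create_intergal_roman_dict dict_list) := by unfold Pre_create_intergal_roman_dict; infer_instance

def pvWitness_create_intergal_roman_dict : (List (String × String × String)) :=
  [("glob", "is", "I"), ("prok", "is", "V"), ("glob", "is", "I")]

def Spec_create_intergal_roman_dict (dict_list : List (String × String × String)) (out : List (String × String)) : Prop := out = create_intergal_roman_dict_alt dict_list
instance (dict_list : List (String × String × String)) (out : List (String × String)) : Decidable (Spec_create_intergal_roman_dict dict_list out) := by unfold Spec_create_intergal_roman_dict; infer_instance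

-- ===== CLAIM (what is proved, stated in full; the proofs are below) =====
def Claim_equal_create_intergal_roman_dict : Prop := ∀ (dict_list : List (String × String × String)), Dom_create_intergal_roman_dict dict_list → Pre_create_intergal_roman_dict dict_list → Spec_create_intergal_roman_dict dict_list (create_intergal_roman_dict dict_list)

-- ===== LEMMAS AND PROOFS =====

-- phase 2 on a list of singleton groups just unwraps them
lemma goB2_singles (acc : List (String × String)) :
    ∀ res, goB2 res (acc.map (fun p => (p.1, [p.2]))) = res ++ acc := by
  induction acc with
  | nil => intro res; simp [goB2]
  | cons p t ih => intro res; simp [goB2, ih]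

-- main invariant: under consistency, B's grouping fold tracks A's dict as singleton groups
lemma fold_eq : ∀ (t : List (String × String × String)) (acc : List (String × String)),
    (∀ p ∈ acc, ∀ e ∈ t, e.1 = p.1 → e.2.2 = p.2) →
    (∀ e1 ∈ t, ∀ e2 ∈ t, e1.1 = e2.1 → e1.2.2 = e2.2.2) →
    t.foldl (fun g e => bAdd g e.1 e.2.2) (acc.map (fun p => (p.1, [p.2])))
      = (goA acc t).map (fun p => (p.1, [p.2])) := by
  intro t
  induction t with
  | nil => intro acc _ _; simp [goA]
  | cons e t ih =>
    intro acc hinv hpre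
    simp only [List.foldl_cons]
    by_cases hk : acc.any (fun p => p.1 == e.1)
    · -- key present: every entry in acc with key e.1 has value e.2.2; groups unchanged
      have hval : ∀ p ∈ acc, p.1 = e.1 → p.2 = e.2.2 := by
        intro p hp hpk
        exact (hinv p hp e (List.mem_cons_self ..) hpk.symm).symm
      have hb : bAdd (acc.map (fun p => (p.1, [p.2]))) e.1 e.2.2
          = acc.map (fun p => (p.1, [p.2])) := by
        unfold bAdd
        have : (acc.map (fun p => (p.1, [p.2]))).any (fun p => p.1 == e.1) = true := by
          simpa [List.any_map, Function.comp] using hk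
        rw [if_pos this, List.map_map]
        refine List.map_congr_left ?_
        intro p hp
        by_cases hpk : p.1 = e.1
        · have hv := hval p hp hpk
          simp [Function.comp, hpk, hv]
        · simp [Function.comp, hpk]
      -- A's side: find? returns an entry with key e.1, whose value is e.2.2
      obtain ⟨q, hq⟩ : ∃ q, acc.find? (fun p => p.1 == e.1) = some q := by
        rcases List.any_eq_true.mp hk with ⟨p, hp, hpk⟩
        exact Option.isSome_iff_exists.mp (List.find?_isSome.mpr ⟨p, hp, hpk⟩)
      have hqmem := List.mem_of_find?_eq_some hq
      have hqk : q.1 = e.1 := by simpa using List.find?_some hq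
      have hqv : q.2 = e.2.2 := hval q hqmem hqk
      rw [hb]
      simp only [goA, hk, not_true_eq_false, if_false, hq, Option.map_some, Option.getD_some,
        hqv, BEq.rfl, if_true]
      exact ih acc (fun p hp e' he' => hinv p hp e' (List.mem_cons_of_mem _ he'))
        (fun e1 h1 e2 h2 => hpre e1 (List.mem_cons_of_mem _ h1) e2 (List.mem_cons_of_mem _ h2))
    · -- key absent: both append a fresh (singleton) entry
      have hb : bAdd (acc.map (fun p => (p.1, [p.2]))) e.1 e.2.2
          = ((acc ++ [(e.1, e.2.2)]).map (fun p => (p.1, [p.2]))) := by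
        unfold bAdd
        have heq : (acc.map (fun p => (p.1, [p.2]))).any (fun p => p.1 == e.1)
            = acc.any (fun p => p.1 == e.1) := by
          rw [List.any_map]; rfl
        rw [heq, if_neg hk]; simp
      rw [hb]
      rw [goA, if_pos (by simpa using hk)]
      refine ih (acc ++ [(e.1, e.2.2)]) ?_ 
        (fun e1 h1 e2 h2 => hpre e1 (List.mem_cons_of_mem _ h1) e2 (List.mem_cons_of_mem _ h2))
      intro p hp e' he'
      rcases List.mem_append.mp hp with hp | hp
      · exact hinv p hp e' (List.mem_cons_of_mem _ he')
      · have : p = (e.1, e.2.2) := by simpa using hp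
        subst this
        intro hke
        exact hpre e' (List.mem_cons_of_mem _ he') e (List.mem_cons_self ..) hke
-- ===== VERDICT (by name: the statement is the Claim_ definition above) =====
theorem create_intergal_roman_dict_spec : Claim_equal_create_intergal_roman_dict := by
  intro l _ hpre
  unfold Spec_create_intergal_roman_dict create_intergal_roman_dict create_intergal_roman_dict_alt
  have h := fold_eq l [] (by simp) hpre
  simp only [List.map_nil] at h
  rw [h, goB2_singles, List.nil_append]
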